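-- pv_equiv track=rewrite | github.com/Exifers/Faulhaber | polymat.py | builtA
-- ===== SOURCE A (Python) =====
-- def builtA(m):
--     A=[]
--     for i in range(m+1):
--         l=[]
--         for j in range(m+2):
--             if i==j or (i+1==j):
--                 l+=[1]
--             else:
--                 l+=[0]
--         A+=[l]
--     A[m][m+1]=1
--     return A
-- ===== SOURCE B (Python) =====
-- def builtA(m):
--     # each row i is i zeros, then [1, 1], then zeros up to width m + 2
--     return [[0] * i + [1, 1] + [0] * (m - i) for i in range(m + 1)]
-- ===== Notes on version B (the rewrite author's own statement) =====
-- stated objective: simpler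
-- what changed: Each row is built by direct concatenation of a zero-prefix, the two ones, and a zero-suffix in one comprehension, instead of scanning every column with a predicate and performing a redundant trailing element assignment.
-- crash fix: For negative m A raises IndexError on the trailing element assignment into the empty matrix; B returns the empty list. — e.g. on builtA(-1): A raises IndexError, B returns []
import Mathlib
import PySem

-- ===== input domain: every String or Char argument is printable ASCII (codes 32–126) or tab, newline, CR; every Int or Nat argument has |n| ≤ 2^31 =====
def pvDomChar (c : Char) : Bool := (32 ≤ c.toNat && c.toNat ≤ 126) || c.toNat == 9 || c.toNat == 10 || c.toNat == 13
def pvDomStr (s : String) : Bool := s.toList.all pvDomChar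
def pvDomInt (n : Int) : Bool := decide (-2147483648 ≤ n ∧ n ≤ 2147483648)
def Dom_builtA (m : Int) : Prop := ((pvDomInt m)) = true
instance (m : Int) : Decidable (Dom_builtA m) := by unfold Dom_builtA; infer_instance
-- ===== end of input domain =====

-- B builds each row by direct concatenation (i zeros, the two ones, m-i zeros) in one pass per row,
-- instead of A's per-column predicate scan followed by a redundant trailing element assignment.


-- ===== PORT A =====
-- the nested loops building A (rows scanned column by column with the predicate)
def builtA_loop (m : Int) : List (List Int) :=
  (PySem.List.pyRange 0 (m + 1) 1).foldl (fun A i =>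
    A ++ [(PySem.List.pyRange 0 (m + 2) 1).foldl (fun l j =>
      if i = j ∨ i + 1 = j then l ++ [(1 : Int)] else l ++ [(0 : Int)]) []]) []

-- after the loops, A[m][m+1] = 1 (ported with pyGet?/pySet?; IndexError = none, outside Pre_)
def builtA (m : Int) : List (List Int) :=
  match PySem.List.pyGet? (builtA_loop m) m with
  | none => builtA_loop m
  | some row =>
    match PySem.List.pySet? row (m + 1) 1 with
    | none => builtA_loop m
    | some row' => PySem.List.pySetD (builtA_loop m) m row'

-- ===== PORT B =====
def builtA_alt (m : Int) : List (List Int) :=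
  (PySem.List.pyRange 0 (m + 1) 1).map (fun i =>
    PySem.List.pyRepeat [(0 : Int)] i ++ [1, 1] ++ PySem.List.pyRepeat [(0 : Int)] (m - i))

-- ===== PRECONDITION & SPEC =====
-- For negative m the loop yields the empty matrix and the trailing element assignment raises IndexError.
def Pre_builtA (m : Int) : Prop := 0 ≤ m
instance (m : Int) : Decidable (Pre_builtA m) := by unfold Pre_builtA; infer_instance
def pvWitness_builtA : Int := 3

-- For negative m A raises IndexError (indexing into the empty matrix); B returns the empty list.
def Raises_builtA (m : Int) : Prop := m < 0
instance (m : Int) : Decidable (Raises_builtA m) := by unfold Raises_builtA; infer_instance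
def pvRaiseWitness_builtA : Int := -1
def pvRaiseWitnessOut_builtA : List (List Int) := []

def Spec_builtA (m : Int) (out : List (List Int)) : Prop := out = builtA_alt m
instance (m : Int) (out : List (List Int)) : Decidable (Spec_builtA m out) := by unfold Spec_builtA; infer_instance

-- ===== CLAIM (what is proved, stated in full; the proofs are below) =====
def Claim_equal_builtA : Prop := ∀ (m : Int), Dom_builtA m → Pre_builtA m → Spec_builtA m (builtA m)
-- the crash-fix claim, proved at the bottom as theorem builtA_raises
def Claim_raises_builtA : Prop := (∀ (m : Int), Dom_builtA m → Raises_builtA m → ¬ Pre_builtA m) ∧ (Dom_builtA (pvRaiseWitness_builtA) ∧ Raises_builtA (pvRaiseWitness_builtA) ∧ builtA_alt (pvRaiseWitness_builtA) = pvRaiseWitnessOut_builtA)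

-- ===== LEMMAS AND PROOFS =====

-- outer append-one foldl is a map
theorem foldl_append_one (xs : List Int) (f : Int → List Int) (init : List (List Int)) :
    xs.foldl (fun A i => A ++ [f i]) init = init ++ xs.map f := by
  induction xs generalizing init with
  | nil => simp
  | cons x xs ih => simp [ih]

-- the inner ite-loop written as a map
theorem inner_foldl_eq_map (i : Int) (xs : List Int) (init : List Int) :
    xs.foldl (fun l j =>
      if i = j ∨ i + 1 = j then l ++ [(1 : Int)] else l ++ [(0 : Int)]) init
    = init ++ xs.map (fun j => if i = j ∨ i + 1 = j then (1 : Int) else 0) := by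
  induction xs generalizing init with
  | nil => simp
  | cons x xs ih =>
    simp only [List.foldl_cons, List.map_cons]
    split_ifs with h <;> simp [ih]

-- a range mapped to a constant is a replicate
theorem map_range_const (a b : Int) (f : Int → Int) (c : Int)
    (hf : ∀ j, a ≤ j → j < b → f j = c) :
    (PySem.List.pyRange a b 1).map f = List.replicate (b - a).toNat c := by
  have h : (PySem.List.pyRange a b 1).map f = (PySem.List.pyRange a b 1).map (fun _ => c) :=
    List.map_congr_left (fun j hj => by
      rw [PySem.List.mem_pyRange_one] at hj
      exact hf j hj.1 hj.2)
  rw [h, List.map_const', PySem.List.length_pyRange_one]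

-- row characterisation: A's predicate-scanned row equals B's concatenated row
theorem row_eq (m i : Int) (h0 : 0 ≤ i) (hm : i ≤ m) :
    (PySem.List.pyRange 0 (m + 2) 1).map (fun j => if i = j ∨ i + 1 = j then (1 : Int) else 0)
    = PySem.List.pyRepeat [(0 : Int)] i ++ [1, 1] ++ PySem.List.pyRepeat [(0 : Int)] (m - i) := by
  have hmid : PySem.List.pyRange i (i + 2) 1 = [i, i + 1] := by
    rw [PySem.List.pyRange_one_cons (by omega), PySem.List.pyRange_one_cons (by omega),
        PySem.List.pyRange_one_eq_nil (by omega)]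
  rw [PySem.List.pyRange_one_append 0 i (m + 2) h0 (by omega),
      PySem.List.pyRange_one_append i (i + 2) (m + 2) (by omega) (by omega), hmid]
  simp only [List.map_append, List.map_cons, List.map_nil]
  rw [map_range_const 0 i _ 0 (fun j h1 h2 => by split_ifs <;> omega),
      map_range_const (i + 2) (m + 2) _ 0 (fun j h1 h2 => by split_ifs <;> omega)]
  simp only [PySem.List.pyRepeat_singleton]
  have e1 : (i - 0).toNat = i.toNat := by omega
  have e2 : (m + 2 - (i + 2)).toNat = (m - i).toNat := by omega
  rw [e1, e2]
  simp

-- the matrix built by the loops equals B's result (for 0 ≤ m)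
theorem loop_eq_alt (m : Int) (_hm : 0 ≤ m) : builtA_loop m = builtA_alt m := by
  unfold builtA_loop builtA_alt
  rw [show (fun A i => A ++ [(PySem.List.pyRange 0 (m + 2) 1).foldl (fun l j =>
        if i = j ∨ i + 1 = j then l ++ [(1 : Int)] else l ++ [(0 : Int)]) []])
      = (fun A i => A ++ [[] ++ (PySem.List.pyRange 0 (m + 2) 1).map
          (fun j => if i = j ∨ i + 1 = j then (1 : Int) else 0)]) from
    funext fun A => funext fun i => by rw [inner_foldl_eq_map]]
  rw [foldl_append_one]
  simp only [List.nil_append]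
  apply List.map_congr_left
  intro i hi
  rw [PySem.List.mem_pyRange_one] at hi
  exact row_eq m i hi.1 (by omega)

-- setting position n+1 of the last row to 1 leaves it unchanged
theorem set_last_row (n : Nat) :
    (List.replicate n (0 : Int) ++ [1, 1]).set (n + 1) 1 = List.replicate n (0 : Int) ++ [1, 1] := by
  induction n with
  | zero => rfl
  | succ k ih => simp [List.replicate_succ, ih]

-- the last row of B's matrix
theorem alt_last_row (n : Nat) :
    (builtA_alt (n : Int))[n]? = some (List.replicate n (0 : Int) ++ [1, 1]) := by
  unfold builtA_alt
  rw [show ((n : Int) + 1) = ((n + 1 : Nat) : Int) from by push_cast; ring]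
  rw [PySem.List.getElem?_map_pyRange_zero (f := fun i =>
        PySem.List.pyRepeat [(0 : Int)] i ++ [1, 1] ++ PySem.List.pyRepeat [(0 : Int)] ((n : Int) - i))
      (n + 1) n (by omega)]
  simp [PySem.List.pyRepeat_singleton]

-- ===== VERDICT (by name: the statement is the Claim_ definition above) =====
theorem builtA_spec : Claim_equal_builtA := by
  intro m _ hpre
  unfold Spec_builtA builtA
  rw [loop_eq_alt m hpre]
  obtain ⟨n, rfl⟩ := Int.eq_ofNat_of_zero_le hpre
  have hget : PySem.List.pyGet? (builtA_alt (n : Int)) (n : Int)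
      = some (List.replicate n (0 : Int) ++ [1, 1]) := by
    rw [PySem.List.pyGet?_natCast]; exact alt_last_row n
  have hset : PySem.List.pySet? (List.replicate n (0 : Int) ++ [1, 1]) ((n : Int) + 1) 1
      = some ((List.replicate n (0 : Int) ++ [1, 1]).set (n + 1) 1) := by
    rw [show ((n : Int) + 1) = ((n + 1 : Nat) : Int) from by push_cast; ring]
    exact PySem.List.pySet?_natCast _ (n + 1) 1 (by simp)
  simp only [hget, hset, set_last_row]
  rw [show ((n : Nat) : Int) = ((n : Nat) : Int) from rfl, PySem.List.pySetD_natCast]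
  have hn : n < (builtA_alt (n : Int)).length := by
    unfold builtA_alt
    rw [List.length_map, PySem.List.length_pyRange_one]
    omega
  rw [show (List.replicate n (0 : Int) ++ [1, 1]) = (builtA_alt (n : Int))[n] from by
    have h := alt_last_row n
    rw [List.getElem?_eq_getElem hn] at h
    exact (Option.some_inj.mp h).symm]
  exact List.set_getElem_self hn

theorem builtA_raises : Claim_raises_builtA := by
  unfold Claim_raises_builtA
  exact ⟨fun m _ hr hp => absurd hp (by unfold Pre_builtA Raises_builtA at *; omega), by decide⟩

-- witness self-check: B's port really returns [] at the raise witness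
theorem builtA_raises_witness :
    builtA_alt pvRaiseWitness_builtA = pvRaiseWitnessOut_builtA := builtA_raises.2.2.2
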